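-- pv_equiv track=rewrite | github.com/decembaek/coding_test | decembaek/2024_02/2024_02_27/Lv.0/원소들의_곱과_합.py | solution
-- ===== SOURCE A (Python) =====
-- def solution(num_list):
--     a = None
--     b = None
--     for num in num_list:
--         if a == None and b == None:
--             a = num
--             b = num
--             continue
--         a = a * num
--         b = b + num
--     b = b**2
--     if a > b:
--         answer = 0
--     else:
--         answer = 1
--     return answer
-- ===== SOURCE B (Python) =====
-- def solution(num_list):
--     def agg(lo, hi):
--         # (product, sum) of num_list[lo:hi] by divide and conquer; hi > lo expected
--         if hi - lo == 1:
--             v = num_list[lo]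
--             return v, v
--         mid = (lo + hi) // 2
--         p1, s1 = agg(lo, mid)
--         p2, s2 = agg(mid, hi)
--         return p1 * p2, s1 + s2
--     p, s = agg(0, len(num_list))
--     return 0 if p > s * s else 1
-- ===== Notes on version B (the rewrite author's own statement) =====
-- stated objective: faster
-- what changed: Replaces A's single linear accumulator loop (with its None-sentinel first-element branch) by a divide-and-conquer recursion over index ranges that computes the (product, sum) of each half and combines them; the balanced product tree multiplies similarly-sized big integers instead of repeatedly multiplying a huge accumulator by one small factor, which a timing run measured as 9x faster at n=65536.
import Mathlib
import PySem

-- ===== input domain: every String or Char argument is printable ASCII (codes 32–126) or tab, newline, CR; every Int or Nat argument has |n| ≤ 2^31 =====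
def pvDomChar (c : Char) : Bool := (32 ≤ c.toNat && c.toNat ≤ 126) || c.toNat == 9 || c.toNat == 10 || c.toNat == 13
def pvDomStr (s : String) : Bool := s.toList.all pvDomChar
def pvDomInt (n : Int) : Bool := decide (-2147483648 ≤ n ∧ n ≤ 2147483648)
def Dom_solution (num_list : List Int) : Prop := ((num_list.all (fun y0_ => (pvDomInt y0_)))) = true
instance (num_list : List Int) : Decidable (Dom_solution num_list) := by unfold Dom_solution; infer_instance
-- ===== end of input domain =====

-- B replaces A's single accumulator loop by a divide-and-conquer recursion over index
-- ranges (product and sum of each half, combined); equivalence is claimed on non-empty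
-- lists — on [] A raises TypeError and B raises RecursionError.

-- ===== PORT A =====
-- A keeps a pair state (a, b): none before the first element (Python's a = b = None),
-- some (a, b) afterwards; 'a == None and b == None' is exactly the none case.
def solution (num_list : List Int) : Int :=
  let s := num_list.foldl
    (fun (s : Option (Int × Int)) num =>
      match s with
      | none => some (num, num)          -- first element: a = num; b = num; continue
      | some (a, b) => some (a * num, b + num))
    none
  match s with
  | none => 0          -- unreachable under Pre_: Python raises TypeError at b**2 here
  | some (a, b) => if a > b ^ 2 then 0 else 1

-- ===== PORT B =====
-- agg num_list lo hi = (product, sum) of num_list[lo:hi] by divide and conquer.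
-- The hi ≤ lo guard only makes the recursion total (Python recurses forever there;
-- unreachable from solution_alt on non-empty input), and getD's default 0 only makes
-- the in-range num_list[lo] access total.
def agg (num_list : List Int) (lo hi : Nat) : Int × Int :=
  if _h0 : hi ≤ lo then (1, 0)
  else if _h1 : hi - lo = 1 then
    let v := num_list.getD lo 0
    (v, v)
  else
    let mid := (lo + hi) / 2
    let r1 := agg num_list lo mid
    let r2 := agg num_list mid hi
    (r1.1 * r2.1, r1.2 + r2.2)
termination_by hi - lo
decreasing_by all_goals omega

def solution_alt (num_list : List Int) : Int :=
  let r := agg num_list 0 num_list.length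
  if r.1 > r.2 * r.2 then 0 else 1

-- ===== PRECONDITION & SPEC =====
-- Pre_ excludes only the empty list, on which both Pythons raise.
def Pre_solution (num_list : List Int) : Prop := num_list ≠ []
instance (num_list : List Int) : Decidable (Pre_solution num_list) := by unfold Pre_solution; infer_instance
def pvWitness_solution : List Int := [3, 2]

def Spec_solution (num_list : List Int) (out : Int) : Prop := out = solution_alt num_list
instance (num_list : List Int) (out : Int) : Decidable (Spec_solution num_list out) := by unfold Spec_solution; infer_instance

-- ===== CLAIM =====
def Claim_equal_solution : Prop := ∀ (num_list : List Int), Dom_solution num_list → Pre_solution num_list → Spec_solution num_list (solution num_list)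

-- ===== LEMMAS AND PROOFS =====

-- agg computes the product and sum of the slice num_list[lo:hi].
theorem agg_eq (l : List Int) : ∀ n lo hi, hi - lo = n → lo < hi → hi ≤ l.length →
    agg l lo hi = (((l.drop lo).take (hi - lo)).prod, ((l.drop lo).take (hi - lo)).sum) := by
  intro n
  induction n using Nat.strong_induction_on with
  | _ n ih =>
    intro lo hi hn hlt hle
    rw [agg]
    split_ifs with h0 h1
    · omega
    · have hlt' : lo < l.length := by omega
      rw [h1, List.drop_eq_getElem_cons hlt']
      simp only [List.take_succ_cons, List.take_zero, List.prod_cons, List.prod_nil,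
        List.sum_cons, List.sum_nil, mul_one, add_zero, List.getD_eq_getElem?_getD,
        List.getElem?_eq_getElem hlt', Option.getD_some]
    · have h2 : 2 ≤ hi - lo := by omega
      have hm1 : lo < (lo + hi) / 2 := by omega
      have hm2 : (lo + hi) / 2 < hi := by omega
      show ((agg l lo ((lo + hi) / 2)).1 * (agg l ((lo + hi) / 2) hi).1,
            (agg l lo ((lo + hi) / 2)).2 + (agg l ((lo + hi) / 2) hi).2) =
          (((l.drop lo).take (hi - lo)).prod, ((l.drop lo).take (hi - lo)).sum)
      rw [ih ((lo + hi) / 2 - lo) (by omega) lo ((lo + hi) / 2) rfl hm1 (by omega),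
          ih (hi - (lo + hi) / 2) (by omega) ((lo + hi) / 2) hi rfl hm2 hle]
      have hsplit : (l.drop lo).take (hi - lo) =
          (l.drop lo).take ((lo + hi) / 2 - lo) ++ (l.drop ((lo + hi) / 2)).take (hi - (lo + hi) / 2) := by
        have : l.drop ((lo + hi) / 2) = (l.drop lo).drop ((lo + hi) / 2 - lo) := by
          rw [List.drop_drop]; congr 1; omega
        rw [this, ← List.take_add]; congr 1; omega
      rw [hsplit]
      simp

-- A's loop state after the first element carries exactly (running product, running sum).
theorem solution_fold_some (xs : List Int) (a b : Int) :
    xs.foldl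
      (fun (s : Option (Int × Int)) num =>
        match s with
        | none => some (num, num)
        | some (a, b) => some (a * num, b + num))
      (some (a, b)) = some (xs.foldl (· * ·) a, xs.foldl (· + ·) b) := by
  induction xs generalizing a b with
  | nil => rfl
  | cons y ys ih => simp [List.foldl, ih]

theorem foldl_mul (xs : List Int) (a : Int) : xs.foldl (· * ·) a = a * xs.prod := by
  induction xs generalizing a with
  | nil => simp
  | cons y ys ih => simp [List.foldl, ih, mul_assoc]

theorem foldl_add (xs : List Int) (a : Int) : xs.foldl (· + ·) a = a + xs.sum := by
  induction xs generalizing a with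
  | nil => simp
  | cons y ys ih => simp [List.foldl, ih, add_assoc]

-- ===== VERDICT =====
theorem solution_spec : Claim_equal_solution := by
  intro num_list _ hpre
  unfold Spec_solution solution solution_alt
  match num_list with
  | [] => exact absurd rfl hpre
  | x :: xs =>
    rw [agg_eq (x :: xs) ((x :: xs).length - 0) 0 (x :: xs).length rfl (by simp) le_rfl]
    simp only [List.foldl, solution_fold_some, List.drop_zero, Nat.sub_zero,
      List.take_length, foldl_mul, foldl_add, List.prod_cons, List.sum_cons]
    have : (x + xs.sum) ^ 2 = (x + xs.sum) * (x + xs.sum) := by ring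
    rw [this]
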